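-- pv_equiv track=rewrite | github.com/AlexKitIt/Python-112 | Орехов.18.py | change_char_to_str
-- ===== SOURCE A (Python) =====
-- def change_char_to_str(s, new):
--     s2 = ""
--     i = 0
--     while i < len(s):
--         if i % 2 == 0:
--             s2 = s2+new
--         else:
--             s2 = s2 + s[i]
--         i = i + 1
--
--     return s2
-- ===== SOURCE B (Python) =====
-- def change_char_to_str(s, new):
--     odds = s[1::2]
--     parts = []
--     for c in odds:
--         parts.append(new)
--         parts.append(c)
--     if len(s) % 2 == 1:
--         parts.append(new)
--     return ''.join(parts)
-- ===== Notes on version B (the rewrite author's own statement) =====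
-- stated objective: faster
-- what changed: B slices out the kept odd-index characters once (s[1::2]) and interleaves copies of new with them (plus a trailing new for odd length), joining the collected parts at the end, instead of A's per-index parity branch with repeated string concatenation.
import Mathlib
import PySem

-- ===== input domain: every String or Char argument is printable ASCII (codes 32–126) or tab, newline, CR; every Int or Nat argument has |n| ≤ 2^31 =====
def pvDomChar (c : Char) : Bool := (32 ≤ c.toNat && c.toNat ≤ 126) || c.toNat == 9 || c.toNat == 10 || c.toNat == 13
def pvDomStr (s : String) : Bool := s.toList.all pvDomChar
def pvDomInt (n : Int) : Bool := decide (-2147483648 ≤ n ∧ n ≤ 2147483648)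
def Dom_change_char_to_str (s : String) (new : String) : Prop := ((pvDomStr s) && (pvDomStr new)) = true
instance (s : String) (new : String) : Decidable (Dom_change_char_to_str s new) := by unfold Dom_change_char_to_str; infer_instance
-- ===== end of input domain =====

-- B interleaves `new` with the slice s[1::2] instead of branching on index parity; same result, different decomposition.
-- ===== PORT A =====
def change_char_to_str (s : String) (new : String) : String :=
  String.ofList ((PySem.List.pyRange 0 (s.toList.length : Int) 1).foldl
    (fun s2 i =>
      if PySem.Int.mod i 2 = 0 then s2 ++ new.toList
      else s2 ++ [PySem.List.pyGetD s.toList i ' ']) [])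

-- ===== PORT B =====
def change_char_to_str_alt (s : String) (new : String) : String :=
  let odds := (PySem.List.slice? s.toList (some 1) none 2).getD []
  let parts := odds.foldl (fun ps c => ps ++ [new.toList, [c]]) ([] : List (List Char))
  let parts := if s.toList.length % 2 = 1 then parts ++ [new.toList] else parts
  String.ofList parts.flatten

-- ===== PRECONDITION & SPEC =====
def Spec_change_char_to_str (s : String) (new : String) (out : String) : Prop := out = change_char_to_str_alt s new
instance (s : String) (new : String) (out : String) : Decidable (Spec_change_char_to_str s new out) := by unfold Spec_change_char_to_str; infer_instance

-- ===== CLAIM (what is proved, stated in full; the proofs are below) =====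
def Claim_equal_change_char_to_str : Prop := ∀ (s : String) (new : String), Dom_change_char_to_str s new → Spec_change_char_to_str s new (change_char_to_str s new)

-- ===== LEMMAS AND PROOFS =====

-- the common value both sides compute: `new` before every odd-index character, one trailing `new` for odd length
def interleave (nl : List Char) : List Char → List Char
  | [] => []
  | [_] => nl
  | _ :: b :: t => nl ++ b :: interleave nl t

-- the odd-index characters of a list
def oddsOf {α : Type} : List α → List α
  | [] => []
  | [_] => []
  | _ :: b :: t => b :: oddsOf t

lemma rangeFlat (t : List Char) (nl : List Char) :
    (List.range t.length).flatMap
      (fun k => if k % 2 = 0 then nl else [t.getD k ' ']) = interleave nl t := by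
  induction t using oddsOf.induct with
  | case1 => simp [interleave]
  | case2 a => simp [interleave]
  | case3 a b r ih =>
    simp only [List.length_cons, List.range_succ_eq_map, List.flatMap_cons, List.flatMap_map]
    have hcongr : (List.range r.length).flatMap
        (fun k => if (k + 1 + 1) % 2 = 0 then nl else [(a :: b :: r).getD (k + 1 + 1) ' '])
        = interleave nl r := by
      rw [← ih]
      exact List.flatMap_congr (fun k _ => by
        rw [show (k + 1 + 1) % 2 = k % 2 from by omega]; simp)
    rw [hcongr]
    simp [interleave]

lemma A_chars (s new : String) :
    (change_char_to_str s new).toList = interleave new.toList s.toList := by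
  unfold change_char_to_str
  have hbody : (fun (s2 : List Char) (i : Int) =>
      if PySem.Int.mod i 2 = 0 then s2 ++ new.toList
      else s2 ++ [PySem.List.pyGetD s.toList i ' ']) =
      (fun s2 i => s2 ++ (if PySem.Int.mod i 2 = 0 then new.toList
        else [PySem.List.pyGetD s.toList i ' '])) := by
    funext s2 i; split_ifs <;> rfl
  rw [hbody, PySem.List.foldl_append_eq_flatMap, PySem.List.pyRange_one]
  simp only [List.flatMap_map, zero_add, Int.sub_zero, Int.toNat_natCast, List.nil_append]
  have hcongr : (List.range s.toList.length).flatMap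
      (fun k => if PySem.Int.mod ((k : Nat) : Int) 2 = 0 then new.toList
        else [PySem.List.pyGetD s.toList ((k : Nat) : Int) ' '])
      = interleave new.toList s.toList := by
    rw [← rangeFlat s.toList new.toList]
    refine List.flatMap_congr (fun k _ => ?_)
    have hm : PySem.Int.mod ((k : Nat) : Int) 2 = ((k % 2 : Nat) : Int) := by
      exact_mod_cast PySem.Int.mod_natCast k 2
    rw [hm, PySem.List.pyGetD_natCast]
    by_cases h : k % 2 = 0
    · simp [h]
    · rw [if_neg (by omega : ¬((k % 2 : Nat) : Int) = 0), if_neg h]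
  rw [hcongr]
  simp

lemma odds_filterMap (cs : List Char) :
    (List.range (cs.length / 2)).filterMap
      (fun k => cs[(1 + 2 * k : Nat)]?) = oddsOf cs := by
  induction cs using oddsOf.induct with
  | case1 => simp [oddsOf]
  | case2 a => simp [oddsOf]
  | case3 a b r ih =>
    have hlen : (a :: b :: r).length / 2 = r.length / 2 + 1 := by
      simp only [List.length_cons]; omega
    have h0 : (a :: b :: r)[(1 + 2 * 0 : Nat)]? = some b := by simp
    rw [hlen, List.range_succ_eq_map]
    simp only [List.filterMap_cons, List.filterMap_map, h0]
    have hcongr : List.filterMap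
        ((fun k => (a :: b :: r)[(1 + 2 * k : Nat)]?) ∘ Nat.succ)
        (List.range (r.length / 2)) = oddsOf r := by
      rw [← ih]
      refine List.filterMap_congr (fun k _ => ?_)
      simp only [Function.comp_apply, Nat.succ_eq_add_one]
      rw [show (1 + 2 * (k + 1) : Nat) = (1 + 2 * k) + 1 + 1 from by omega]
      simp
    rw [hcongr]
    rfl

lemma slice_odds (cs : List Char) :
    (PySem.List.slice? cs (some 1) none 2).getD [] = oddsOf cs := by
  rw [← odds_filterMap]
  unfold PySem.List.slice? PySem.List.sliceIndices
  norm_num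
  cases cs with
  | nil => rfl
  | cons a t =>
    have h1 : (1 : Int) ≤ ((a :: t).length : Int) := by
      have := Nat.succ_le_succ (Nat.zero_le t.length)
      exact_mod_cast this
    have hmin : min (1 : Int) ((a :: t).length : Int) = 1 := by omega
    rw [hmin]
    have hcount : (if 1 < (a :: t).length then
        ((((a :: t).length : Int) - 1 + 2 - 1) / 2).toNat else 0) = (a :: t).length / 2 := by
      split_ifs with h
      · have he : (((a :: t).length : Int) - 1 + 2 - 1) = ((a :: t).length : Int) := by ring
        rw [he]; omega
      · omega
    rw [hcount]
    refine List.filterMap_congr (fun x _ => ?_)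
    have hix : ((1 : Int) + 2 * (x : Int)).toNat = 1 + 2 * x := by omega
    rw [hix]

lemma interleave_of_odds (t : List Char) (nl : List Char) :
    (oddsOf t).flatMap (fun c => nl ++ [c]) ++
      (if t.length % 2 = 1 then nl else []) = interleave nl t := by
  induction t using oddsOf.induct with
  | case1 => simp [oddsOf, interleave]
  | case2 a => simp [oddsOf, interleave]
  | case3 a b r ih =>
    simp only [oddsOf, interleave, List.flatMap_cons, List.length_cons]
    have h2 : (r.length + 1 + 1) % 2 = r.length % 2 := by omega
    simp only [h2]
    rw [List.append_assoc, ih]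
    simp

lemma B_chars (s new : String) :
    (change_char_to_str_alt s new).toList = interleave new.toList s.toList := by
  unfold change_char_to_str_alt
  simp only [slice_odds, PySem.List.foldl_append_eq_flatMap, List.nil_append]
  have hflat : ((oddsOf s.toList).flatMap (fun c => [new.toList, [c]])).flatten =
      (oddsOf s.toList).flatMap (fun c => new.toList ++ [c]) := by
    induction oddsOf s.toList with
    | nil => rfl
    | cons x xs ihx => simp only [List.flatMap_cons, List.flatten_append]; rw [ihx]; simp
  split_ifs with h
  · rw [List.flatten_append, hflat]
    rw [← interleave_of_odds s.toList new.toList, if_pos h]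
    simp
  · rw [hflat, ← interleave_of_odds s.toList new.toList, if_neg h]
    simp

-- ===== VERDICT (by name: the statement is the Claim_ definition above) =====
theorem change_char_to_str_spec : Claim_equal_change_char_to_str := by
  intro s new _
  unfold Spec_change_char_to_str
  have h : (change_char_to_str s new).toList = (change_char_to_str_alt s new).toList := by
    rw [A_chars, B_chars]
  have := congrArg String.ofList h
  simpa using this
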